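-- pv_equiv track=rewrite | github.com/Frokker/Python-scripts-for-EGE | task27B_1.py | eff_2
-- ===== SOURCE A (Python) =====
-- def eff_2(a):
--     n = len(a)
--     counter = 0
--     line = [0] * 15
--     for i in range(n):
--         if a[i] % 15 == 0:
--             counter += sum(line)
--         elif a[i] % 5 == 0:
--             counter += line[3]
--         elif a[i] % 3 == 0:
--             counter += line[5]
--         else:
--             counter += line[0]
--         line[a[i] % 15] += 1
--     return counter
-- ===== SOURCE B (Python) =====
-- def eff_2(a):
--     res = [x % 15 for x in a]
--     counter = 0
--     for i in range(len(a)):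
--         r = res[i]
--         if r == 0:
--             counter += i
--         elif r % 5 == 0:
--             counter += res[:i].count(3)
--         elif r % 3 == 0:
--             counter += res[:i].count(5)
--         else:
--             counter += res[:i].count(0)
--     return counter
-- ===== Notes on version B (the rewrite author's own statement) =====
-- stated objective: alternative
-- what changed: Replaces A's 15-slot residue table maintained across the single pass with a table-free nested scan: residues are computed once, and each element directly counts matches in the prefix res[:i] (using i itself where A sums the whole table).
import Mathlib
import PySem

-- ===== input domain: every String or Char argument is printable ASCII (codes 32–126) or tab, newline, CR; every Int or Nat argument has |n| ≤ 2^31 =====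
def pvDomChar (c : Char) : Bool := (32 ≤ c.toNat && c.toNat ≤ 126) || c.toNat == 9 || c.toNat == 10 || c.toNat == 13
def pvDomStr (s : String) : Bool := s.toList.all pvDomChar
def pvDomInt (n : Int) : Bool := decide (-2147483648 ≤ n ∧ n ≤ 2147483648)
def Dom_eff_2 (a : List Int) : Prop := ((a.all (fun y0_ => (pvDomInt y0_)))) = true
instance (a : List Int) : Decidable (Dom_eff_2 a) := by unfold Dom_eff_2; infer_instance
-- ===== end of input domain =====

-- ===== PORT A =====
-- B replaces A's running 15-slot residue table with a direct nested scan of the prefix (alternative decomposition, same values).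
-- A: single pass keeping `line`, a 15-counter table of residues mod 15 of the prefix.
-- `line[a[i] % 15] += 1` : a % 15 is in [0,15) (PySem floor mod, positive divisor), so .toNat is exact here.
def eff_2_go (line : List Int) (rest : List Int) (counter : Int) : Int :=
  match rest with
  | [] => counter
  | x :: t =>
      let add : Int :=
        if PySem.Int.mod x 15 == 0 then line.sum
        else if PySem.Int.mod x 5 == 0 then line.getD 3 0
        else if PySem.Int.mod x 3 == 0 then line.getD 5 0
        else line.getD 0 0
      eff_2_go (line.set (PySem.Int.mod x 15).toNat
                  (line.getD (PySem.Int.mod x 15).toNat 0 + 1)) t (counter + add)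

def eff_2 (a : List Int) : Int :=
  eff_2_go (List.replicate 15 0) a 0

-- ===== PORT B =====
-- B: residues res = [x % 15 for x in a]; for each i, count directly in the prefix res[:i]
-- (`pre` is that prefix, `i = pre.length`); no table is kept.
def eff_2_alt_go (pre : List Int) (rest : List Int) (counter : Int) : Int :=
  match rest with
  | [] => counter
  | r :: t =>
      let add : Int :=
        if r == 0 then (pre.length : Int)
        else if PySem.Int.mod r 5 == 0 then ((pre.count 3 : Nat) : Int)
        else if PySem.Int.mod r 3 == 0 then ((pre.count 5 : Nat) : Int)
        else ((pre.count 0 : Nat) : Int)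
      eff_2_alt_go (pre ++ [r]) t (counter + add)

def eff_2_alt (a : List Int) : Int :=
  eff_2_alt_go [] (a.map (fun x => PySem.Int.mod x 15)) 0

-- ===== PRECONDITION & SPEC =====
def Spec_eff_2 (a : List Int) (out : Int) : Prop := out = eff_2_alt a
instance (a : List Int) (out : Int) : Decidable (Spec_eff_2 a out) := by unfold Spec_eff_2; infer_instance

-- ===== CLAIM (what is proved, stated in full; the proofs are below) =====
def Claim_equal_eff_2 : Prop := ∀ (a : List Int), Dom_eff_2 a → Spec_eff_2 a (eff_2 a)

-- ===== LEMMAS AND PROOFS =====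

-- number of elements of pre with residue k mod 15
def cnt (pre : List Int) (k : Int) : Int :=
  ((pre.countP (fun y => PySem.Int.mod y 15 == k) : Nat) : Int)

-- A's table when the prefix is pre
def lineOf (pre : List Int) : List Int :=
  [cnt pre 0, cnt pre 1, cnt pre 2, cnt pre 3, cnt pre 4, cnt pre 5, cnt pre 6,
   cnt pre 7, cnt pre 8, cnt pre 9, cnt pre 10, cnt pre 11, cnt pre 12, cnt pre 13, cnt pre 14]

lemma cnt_append (pre : List Int) (x k : Int) :
    cnt (pre ++ [x]) k = cnt pre k + (if PySem.Int.mod x 15 = k then 1 else 0) := by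
  simp only [cnt, List.countP_append, List.countP_cons, List.countP_nil, beq_iff_eq]
  split_ifs <;> simp

lemma emod15_cases (x : Int) :
    x % 15 = 0 ∨ x % 15 = 1 ∨ x % 15 = 2 ∨ x % 15 = 3 ∨ x % 15 = 4 ∨ x % 15 = 5 ∨
    x % 15 = 6 ∨ x % 15 = 7 ∨ x % 15 = 8 ∨ x % 15 = 9 ∨ x % 15 = 10 ∨ x % 15 = 11 ∨
    x % 15 = 12 ∨ x % 15 = 13 ∨ x % 15 = 14 := by omega

lemma mod15_eq_emod (x : Int) : PySem.Int.mod x 15 = x % 15 :=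
  PySem.Int.mod_eq_emod_of_pos (by norm_num)

set_option maxHeartbeats 2000000 in
lemma sum_lineOf (pre : List Int) : (lineOf pre).sum = (pre.length : Int) := by
  induction pre using List.reverseRecOn with
  | nil => simp [lineOf, cnt]
  | append_singleton pre x ih =>
      simp only [lineOf, List.sum_cons, List.sum_nil, cnt_append, mod15_eq_emod] at *
      rcases emod15_cases x with h|h|h|h|h|h|h|h|h|h|h|h|h|h|h <;> simp [h] <;> omega

lemma mod5_of_mod15 (x : Int) : PySem.Int.mod (PySem.Int.mod x 15) 5 = PySem.Int.mod x 5 := by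
  rw [PySem.Int.mod_eq_emod_of_pos (by norm_num : (0:Int) < 15),
      PySem.Int.mod_eq_emod_of_pos (by norm_num : (0:Int) < 5),
      PySem.Int.mod_eq_emod_of_pos (by norm_num : (0:Int) < 5)]
  omega

lemma mod3_of_mod15 (x : Int) : PySem.Int.mod (PySem.Int.mod x 15) 3 = PySem.Int.mod x 3 := by
  rw [PySem.Int.mod_eq_emod_of_pos (by norm_num : (0:Int) < 15),
      PySem.Int.mod_eq_emod_of_pos (by norm_num : (0:Int) < 3),
      PySem.Int.mod_eq_emod_of_pos (by norm_num : (0:Int) < 3)]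
  omega

set_option maxHeartbeats 2000000 in
lemma lineOf_update (pre : List Int) (x : Int) :
    (lineOf pre).set (PySem.Int.mod x 15).toNat
        ((lineOf pre).getD (PySem.Int.mod x 15).toNat 0 + 1) = lineOf (pre ++ [x]) := by
  rw [mod15_eq_emod]
  rcases emod15_cases x with h|h|h|h|h|h|h|h|h|h|h|h|h|h|h <;>
    rw [h] <;> simp [lineOf, cnt_append, h]
  -- (each branch: set/getD on the literal 15-list compute)

lemma count_map_res (pre : List Int) (k : Int) :
    (((pre.map (fun x => PySem.Int.mod x 15)).count k : Nat) : Int) = cnt pre k := by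
  simp only [cnt, List.count_eq_countP, List.countP_map]
  rfl

lemma go_eq (rest : List Int) : ∀ (pre : List Int) (counter : Int),
    eff_2_go (lineOf pre) rest counter
      = eff_2_alt_go (pre.map (fun x => PySem.Int.mod x 15))
          (rest.map (fun x => PySem.Int.mod x 15)) counter := by
  induction rest with
  | nil => intro pre counter; rfl
  | cons x t ih =>
      intro pre counter
      rw [List.map_cons, eff_2_go, eff_2_alt_go, lineOf_update, ih, List.map_append]
      congr 1
      have h5 := mod5_of_mod15 x
      have h3 := mod3_of_mod15 x
      by_cases h0 : PySem.Int.mod x 15 = 0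
      · simp only [h0, beq_self_eq_true, if_true, List.length_map]
        rw [sum_lineOf]
      · simp only [beq_iff_eq, h0, if_false, h5, h3, count_map_res]
        split_ifs <;> simp [lineOf]

-- ===== VERDICT (by name: the statement is the Claim_ definition above) =====
theorem eff_2_spec : Claim_equal_eff_2 := by
  intro a _
  show eff_2 a = eff_2_alt a
  have h : lineOf [] = List.replicate 15 0 := by simp [lineOf, cnt]
  rw [eff_2, eff_2_alt, ← h, go_eq, List.map_nil]
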